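-- pv_equiv track=rewrite | github.com/jcoupe-nvidia/by-workshop | src/fallbacks.py | _fix_missing_closing_brace
-- ===== SOURCE A (Python) =====
-- def _fix_missing_closing_brace(text: str) -> str:
--     """If the JSON is truncated with unbalanced braces, close them."""
--     stripped = text.strip()
--     if not stripped.startswith("{"):
--         return text
--
--     depth = 0
--     in_string = False
--     escape_next = False
--     for ch in stripped:
--         if escape_next:
--             escape_next = False
--             continue
--         if ch == "\\":
--             escape_next = True
--             continue
--         if ch == '"':
--             in_string = not in_string
--             continue
--         if in_string:
--             continue
--         if ch == "{":
--             depth += 1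
--         elif ch == "}":
--             depth -= 1
--
--     if depth > 0:
--         return stripped + ("}" * depth)
--     return text
-- ===== SOURCE B (Python) =====
-- def _fix_missing_closing_brace(text: str) -> str:
--     """If the JSON is truncated with unbalanced braces, close them."""
--     stripped = text.strip()
--     if not stripped.startswith("{"):
--         return text
--
--     depth = 0
--     i = 0
--     n = len(stripped)
--     while i < n:
--         ch = stripped[i]
--         if ch == "\\":
--             i += 2
--         elif ch == '"':
--             i += 1
--             while i < n:
--                 if stripped[i] == "\\":
--                     i += 2
--                 elif stripped[i] == '"':
--                     i += 1
--                     break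
--                 else:
--                     i += 1
--         elif ch == "{":
--             depth += 1
--             i += 1
--         elif ch == "}":
--             depth -= 1
--             i += 1
--         else:
--             i += 1
--
--     if depth > 0:
--         return stripped + "}" * depth
--     return text
-- ===== Notes on version B (the rewrite author's own statement) =====
-- stated objective: alternative
-- what changed: Replaces A's per-character state machine with in_string/escape_next boolean flags by an index walk that consumes each backslash-escape as a two-character step and each string literal with a dedicated inner skip loop.
import Mathlib
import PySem

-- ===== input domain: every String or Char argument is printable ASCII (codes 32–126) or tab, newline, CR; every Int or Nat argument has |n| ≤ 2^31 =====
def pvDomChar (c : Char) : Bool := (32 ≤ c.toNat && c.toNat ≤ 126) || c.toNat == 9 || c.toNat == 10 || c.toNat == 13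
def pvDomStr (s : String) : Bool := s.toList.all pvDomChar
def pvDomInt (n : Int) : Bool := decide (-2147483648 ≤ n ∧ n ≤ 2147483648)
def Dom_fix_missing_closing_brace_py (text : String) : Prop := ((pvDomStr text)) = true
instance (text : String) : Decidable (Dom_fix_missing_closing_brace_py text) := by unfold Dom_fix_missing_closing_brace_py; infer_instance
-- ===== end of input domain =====

-- B replaces A's flag-based state machine (escape_next / in_string booleans) by an index walk
-- that consumes escapes and whole string literals with an inner skip loop (objective: alternative).

-- ===== PORT A =====
-- A's for-loop over characters with state (depth, in_string, escape_next)
def pvLoopA : List Char → Int → Bool → Bool → Int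
  | [], d, _, _ => d
  | c :: cs, d, ins, esc =>
    if esc then pvLoopA cs d ins false
    else if c = '\\' then pvLoopA cs d ins true
    else if c = '"' then pvLoopA cs d (!ins) false
    else if ins then pvLoopA cs d ins false
    else if c = '{' then pvLoopA cs (d + 1) ins false
    else if c = '}' then pvLoopA cs (d - 1) ins false
    else pvLoopA cs d ins false

def fix_missing_closing_brace_py (text : String) : String :=
  let stripped := PySem.Str.strip text
  if ¬ (PySem.Str.startswith stripped "{" = true) then text
  else
    let depth := pvLoopA stripped.toList 0 false false
    if depth > 0 then String.ofList (stripped.toList ++ PySem.List.pyRepeat ['}'] depth)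
    else text

-- ===== PORT B =====
-- B's inner while-loop: consume the rest of a string literal, return the remainder
def pvSkipStr : List Char → List Char
  | [] => []
  | c :: cs =>
    if c = '\\' then pvSkipStr (cs.drop 1)
    else if c = '"' then cs
    else pvSkipStr cs
termination_by cs => cs.length
decreasing_by all_goals (simp; try omega)

theorem pvSkipStr_length_aux : ∀ (n : Nat) (cs : List Char), cs.length ≤ n → (pvSkipStr cs).length ≤ cs.length := by
  intro n
  induction n with
  | zero =>
    intro cs h
    have : cs = [] := List.length_eq_zero_iff.mp (Nat.le_zero.mp h)
    subst this; simp [pvSkipStr]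
  | succ n ih =>
    intro cs h
    match cs with
    | [] => simp [pvSkipStr]
    | c :: cs =>
      simp only [List.length_cons, Nat.succ_le_succ_iff] at h
      by_cases hb : c = '\\'
      · have h2 := ih (cs.drop 1) (by simp; omega)
        simp only [pvSkipStr, if_pos hb]
        simp at h2 ⊢; omega
      · by_cases hq : c = '"'
        · simp [pvSkipStr, hq]
        · have h2 := ih cs h
          simp only [pvSkipStr, if_neg hb, if_neg hq]
          simp at h2 ⊢; omega

theorem pvSkipStr_length (cs : List Char) : (pvSkipStr cs).length ≤ cs.length :=
  pvSkipStr_length_aux cs.length cs le_rfl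

-- B's outer while-loop over positions, expressed on the remaining suffix
def pvLoopB : List Char → Int → Int
  | [], d => d
  | c :: cs, d =>
    if c = '\\' then pvLoopB (cs.drop 1) d
    else if c = '"' then pvLoopB (pvSkipStr cs) d
    else if c = '{' then pvLoopB cs (d + 1)
    else if c = '}' then pvLoopB cs (d - 1)
    else pvLoopB cs d
termination_by cs _ => cs.length
decreasing_by
  · simp; try omega
  · have := pvSkipStr_length cs; simp; omega
  · simp
  · simp
  · simp

def fix_missing_closing_brace_py_alt (text : String) : String :=
  let stripped := PySem.Str.strip text
  if ¬ (PySem.Str.startswith stripped "{" = true) then text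
  else
    let depth := pvLoopB stripped.toList 0
    if depth > 0 then String.ofList (stripped.toList ++ PySem.List.pyRepeat ['}'] depth)
    else text

-- ===== PRECONDITION & SPEC =====
def Spec_fix_missing_closing_brace_py (text : String) (out : String) : Prop := out = fix_missing_closing_brace_py_alt text
instance (text : String) (out : String) : Decidable (Spec_fix_missing_closing_brace_py text out) := by unfold Spec_fix_missing_closing_brace_py; infer_instance

-- ===== CLAIM (what is proved, stated in full; the proofs are below) =====
def Claim_equal_fix_missing_closing_brace_py : Prop := ∀ (text : String), Dom_fix_missing_closing_brace_py text → Spec_fix_missing_closing_brace_py text (fix_missing_closing_brace_py text)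

-- ===== LEMMAS AND PROOFS =====

-- A's escape flag just drops the next character
theorem pvLoopA_esc (cs : List Char) (d : Int) (ins : Bool) :
    pvLoopA cs d ins true = pvLoopA (cs.drop 1) d ins false := by
  cases cs <;> simp [pvLoopA]

-- Core correspondence: A's state machine equals B's suffix walk,
-- with in_string = true corresponding to first skipping the string literal.
theorem pvLoopAB_aux : ∀ (n : Nat) (cs : List Char), cs.length ≤ n → ∀ (d : Int) (ins : Bool),
    pvLoopA cs d ins false = pvLoopB (if ins then pvSkipStr cs else cs) d := by
  intro n
  induction n with
  | zero =>
    intro cs h d ins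
    have : cs = [] := List.length_eq_zero_iff.mp (Nat.le_zero.mp h)
    subst this; cases ins <;> simp [pvLoopA, pvLoopB, pvSkipStr]
  | succ n ih =>
    intro cs h d ins
    match cs with
    | [] => cases ins <;> simp [pvLoopA, pvLoopB, pvSkipStr]
    | c :: cs =>
      simp only [List.length_cons, Nat.succ_le_succ_iff] at h
      by_cases hb : c = '\\'
      · subst hb
        rw [show pvLoopA ('\\' :: cs) d ins false = pvLoopA cs d ins true by simp [pvLoopA],
            pvLoopA_esc]
        have hlen : (cs.drop 1).length ≤ n := by simp; omega
        rw [ih _ hlen d ins]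
        cases ins <;>
          simp [pvLoopB, pvSkipStr]
      · by_cases hq : c = '"'
        · subst hq
          rw [show pvLoopA ('"' :: cs) d ins false = pvLoopA cs d (!ins) false by
                simp [pvLoopA, hb]]
          rw [ih cs h d (!ins)]
          cases ins <;> simp [pvLoopB, pvSkipStr]
        · cases ins with
          | true =>
            rw [show pvLoopA (c :: cs) d true false = pvLoopA cs d true false by
                  simp [pvLoopA, hb, hq]]
            rw [ih cs h d true]
            simp [pvSkipStr, hb, hq]
          | false =>
            by_cases ho : c = '{'
            · subst ho
              rw [show pvLoopA ('{' :: cs) d false false = pvLoopA cs (d+1) false false by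
                    simp [pvLoopA]]
              rw [ih cs h (d+1) false]
              simp [pvLoopB]
            · by_cases hc : c = '}'
              · subst hc
                rw [show pvLoopA ('}' :: cs) d false false = pvLoopA cs (d-1) false false by
                      simp [pvLoopA]]
                rw [ih cs h (d-1) false]
                simp [pvLoopB]
              · rw [show pvLoopA (c :: cs) d false false = pvLoopA cs d false false by
                      simp [pvLoopA, hb, hq, ho, hc]]
                rw [ih cs h d false]
                simp [pvLoopB, hb, hq, ho, hc]

theorem pvLoopAB (cs : List Char) (d : Int) : pvLoopA cs d false false = pvLoopB cs d := by
  simpa using pvLoopAB_aux cs.length cs le_rfl d false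

-- ===== VERDICT (by name: the statement is the Claim_ definition above) =====
theorem fix_missing_closing_brace_py_spec : Claim_equal_fix_missing_closing_brace_py := by
  intro text _
  unfold Spec_fix_missing_closing_brace_py fix_missing_closing_brace_py fix_missing_closing_brace_py_alt
  simp only [pvLoopAB]
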